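-- pv_equiv track=rewrite | github.com/snowphone/leetcode | 2147-number-of-ways-to-divide-a-long-corridor/2147-number-of-ways-to-divide-a-long-corridor.py | get_seat_pairs
-- ===== SOURCE A (Python) =====
-- def get_seat_pairs(corridor: str):
--     n = len(corridor)
--     answer = []
--     i = 0
--     while i < n:
--         if corridor[i] != 'S':
--             i += 1
--             continue
--         j = next(k for k in range(i+1, n) if corridor[k] == 'S')
--         answer.append( (i, j) )
--         i = j+1
--     return answer
-- ===== SOURCE B (Python) =====
-- def get_seat_pairs(corridor: str):
--     seats = [k for k, c in enumerate(corridor) if c == 'S']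
--     it = iter(seats)
--     return [(a, next(it)) for a in it]
-- ===== Notes on version B (the rewrite author's own statement) =====
-- stated objective: simpler
-- what changed: Replaces A's index-jumping while-loop with an inner generator search by a two-pass decomposition: one comprehension collecting all seat indices, then pairing them two at a time from an iterator.
import Mathlib
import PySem

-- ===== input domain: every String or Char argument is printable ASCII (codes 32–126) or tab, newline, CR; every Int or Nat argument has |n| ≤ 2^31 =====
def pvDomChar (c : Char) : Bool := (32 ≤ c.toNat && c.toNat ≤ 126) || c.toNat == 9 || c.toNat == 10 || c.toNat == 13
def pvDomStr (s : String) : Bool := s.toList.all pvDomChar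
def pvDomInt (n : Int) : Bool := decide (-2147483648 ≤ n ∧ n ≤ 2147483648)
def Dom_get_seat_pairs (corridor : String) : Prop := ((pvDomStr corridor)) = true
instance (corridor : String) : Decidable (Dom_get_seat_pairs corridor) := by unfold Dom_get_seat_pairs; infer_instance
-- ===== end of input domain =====

-- B replaces A's index-jumping while-loop (inner generator search for the next seat) by a
-- two-pass decomposition: collect all seat indices, then pair them two at a time (objective: simpler).

-- ===== PORT A =====
-- next(k for k in range(i+1, n) if corridor[k] == 'S'); none = StopIteration (excluded by Pre_).
-- fuel (= n - k at the call) only makes the scan structurally recursive; it never runs out.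
def pvFindS (cs : List Char) (n k fuel : Nat) : Option Nat :=
  match fuel with
  | 0 => none
  | fuel + 1 =>
    if k < n then (if cs.getD k ' ' = 'S' then some k else pvFindS cs n (k+1) fuel) else none

-- the while-loop: i jumps to j+1 after each seat pair; fuel (= n - i at the call) is a totality guard
def pvLoopA (cs : List Char) (n i fuel : Nat) : List (Int × Int) :=
  match fuel with
  | 0 => []
  | fuel + 1 =>
    if i < n then
      if cs.getD i ' ' ≠ 'S' then pvLoopA cs n (i+1) fuel
      else
        match pvFindS cs n (i+1) (n - (i+1)) with
        | some j => ((i : Int), (j : Int)) :: pvLoopA cs n (j+1) fuel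
        | none => []   -- Python raises StopIteration here (outside Pre_)
    else []

def get_seat_pairs (corridor : String) : List (Int × Int) :=
  pvLoopA corridor.toList corridor.toList.length 0 corridor.toList.length

-- ===== PORT B =====
-- the pairing loop: it = iter(seats); [(a, next(it)) for a in it]
-- (on an odd-length list Python raises StopIteration — outside Pre_)
def pvPairUp : List Int → List (Int × Int)
  | a :: b :: rest => (a, b) :: pvPairUp rest
  | _ => []

def get_seat_pairs_alt (corridor : String) : List (Int × Int) :=
  pvPairUp (((PySem.List.enumerate corridor.toList 0).filter (fun p => p.2 = 'S')).map Prod.fst)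

-- ===== PRECONDITION & SPEC =====
-- Pre_ excludes corridors with an odd number of 'S': there both A and B raise StopIteration.
def Pre_get_seat_pairs (corridor : String) : Prop :=
  (corridor.toList.filter (fun c => c = 'S')).length % 2 = 0
instance (corridor : String) : Decidable (Pre_get_seat_pairs corridor) := by
  unfold Pre_get_seat_pairs; infer_instance

def pvWitness_get_seat_pairs : String := "SS"

def Spec_get_seat_pairs (corridor : String) (out : List (Int × Int)) : Prop := out = get_seat_pairs_alt corridor
instance (corridor : String) (out : List (Int × Int)) : Decidable (Spec_get_seat_pairs corridor out) := by unfold Spec_get_seat_pairs; infer_instance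

-- ===== CLAIM (what is proved, stated in full; the proofs are below) =====
def Claim_equal_get_seat_pairs : Prop := ∀ (corridor : String), Dom_get_seat_pairs corridor → Pre_get_seat_pairs corridor → Spec_get_seat_pairs corridor (get_seat_pairs corridor)

-- ===== LEMMAS AND PROOFS =====

-- the seat indices of cs in [i, n), as Ints
def pvSeatsFrom (cs : List Char) (n i : Nat) : List Int :=
  if i < n then
    (if cs.getD i ' ' = 'S' then [(i : Int)] else []) ++ pvSeatsFrom cs n (i+1)
  else []
termination_by n - i

theorem pvFindS_le {cs : List Char} {n : Nat} :
    ∀ {fuel k j : Nat}, pvFindS cs n k fuel = some j → k ≤ j := by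
  intro fuel
  induction fuel with
  | zero => intro k j h; simp [pvFindS] at h
  | succ fuel ih =>
    intro k j h
    rw [pvFindS] at h
    by_cases hk : k < n
    · rw [if_pos hk] at h
      by_cases hS : cs.getD k ' ' = 'S'
      · rw [if_pos hS] at h
        simp only [Option.some.injEq] at h
        omega
      · rw [if_neg hS] at h
        have := ih h
        omega
    · rw [if_neg hk] at h
      simp at h

theorem pvFindS_none_seats {cs : List Char} {n : Nat} :
    ∀ {fuel k : Nat}, n - k ≤ fuel → pvFindS cs n k fuel = none →
      pvSeatsFrom cs n k = [] := by
  intro fuel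
  induction fuel with
  | zero =>
    intro k hf _
    rw [pvSeatsFrom, if_neg (by omega)]
  | succ fuel ih =>
    intro k hf h
    rw [pvFindS] at h
    by_cases hk : k < n
    · rw [if_pos hk] at h
      by_cases hS : cs.getD k ' ' = 'S'
      · rw [if_pos hS] at h
        simp at h
      · rw [if_neg hS] at h
        rw [pvSeatsFrom, if_pos hk, if_neg hS]
        simpa using ih (by omega) h
    · rw [pvSeatsFrom, if_neg hk]

theorem pvFindS_some_seats {cs : List Char} {n : Nat} :
    ∀ {fuel k j : Nat}, pvFindS cs n k fuel = some j →
      pvSeatsFrom cs n k = (j : Int) :: pvSeatsFrom cs n (j+1) := by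
  intro fuel
  induction fuel with
  | zero => intro k j h; simp [pvFindS] at h
  | succ fuel ih =>
    intro k j h
    rw [pvFindS] at h
    by_cases hk : k < n
    · rw [if_pos hk] at h
      by_cases hS : cs.getD k ' ' = 'S'
      · rw [if_pos hS] at h
        simp only [Option.some.injEq] at h
        subst h
        rw [pvSeatsFrom, if_pos hk, if_pos hS]
        simp
      · rw [if_neg hS] at h
        rw [pvSeatsFrom, if_pos hk, if_neg hS, ih h]
        simp
    · rw [if_neg hk] at h
      simp at h

theorem pvLoopA_eq_pairUp (cs : List Char) (n : Nat) :
    ∀ (fuel i : Nat), n - i ≤ fuel →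
      pvLoopA cs n i fuel = pvPairUp (pvSeatsFrom cs n i) := by
  intro fuel
  induction fuel with
  | zero =>
    intro i hf
    rw [pvLoopA, pvSeatsFrom, if_neg (by omega)]
    rfl
  | succ fuel ih =>
    intro i hf
    rw [pvLoopA]
    by_cases hi : i < n
    · rw [if_pos hi]
      by_cases hS : cs.getD i ' ' = 'S'
      · rw [if_neg (not_not_intro hS)]
        match hj : pvFindS cs n (i+1) (n - (i+1)) with
        | some j =>
          have hij : i + 1 ≤ j := pvFindS_le hj
          rw [pvSeatsFrom, if_pos hi, if_pos hS, pvFindS_some_seats hj]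
          simp [pvPairUp, ih (j+1) (by omega)]
        | none =>
          rw [pvSeatsFrom, if_pos hi, if_pos hS, pvFindS_none_seats (by omega) hj]
          rfl
      · rw [if_pos hS]
        rw [pvSeatsFrom, if_pos hi, if_neg hS]
        simpa using ih (i+1) (by omega)
    · rw [if_neg hi, pvSeatsFrom, if_neg hi]
      rfl

theorem pvSeatsFrom_eq_enum (cs : List Char) (i : Nat) :
    pvSeatsFrom cs cs.length i =
      ((PySem.List.enumerate (cs.drop i) (i : Int)).filter (fun p => p.2 = 'S')).map Prod.fst := by
  fun_induction pvSeatsFrom cs cs.length i with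
  | case1 =>
    rename_i i hi ih
    have hcast : (((i+1 : Nat)) : Int) = (i : Int) + 1 := by push_cast; ring
    rw [hcast] at ih
    rw [List.drop_eq_getElem_cons hi, PySem.List.enumerate_cons, List.filter_cons]
    have hg : cs[i]?.getD ' ' = cs[i] := by
      simp [List.getElem?_eq_getElem hi]
    by_cases hS : cs[i] = 'S'
    · simp [hg, hS, ih]
    · simp [hg, hS, ih]
  | case2 =>
    rename_i i hi
    have hd : cs.drop i = [] := List.drop_eq_nil_of_le (by omega)
    rw [hd, PySem.List.enumerate_nil]
    rfl

-- ===== VERDICT (by name: the statement is the Claim_ definition above) =====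
theorem get_seat_pairs_spec : Claim_equal_get_seat_pairs := by
  intro corridor _ _
  unfold Spec_get_seat_pairs get_seat_pairs get_seat_pairs_alt
  rw [pvLoopA_eq_pairUp corridor.toList corridor.toList.length corridor.toList.length 0 (by omega),
    pvSeatsFrom_eq_enum]
  norm_num
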